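-- pv_equiv track=rewrite | github.com/Arihantawasthi/kata-dojo | python/ap_coords.py | gen_coords
-- ===== SOURCE A (Python) =====
-- def gen_coords(initial_diff, limit):
--     initial_arr = [0 for _ in range(0, (limit - 1) + (limit - 2))]
--     mid_point = limit - 2
--     l_pointer = mid_point - 1
--     r_pointer = mid_point
--     val = 0
--
--     while (r_pointer < len(initial_arr)):
--         if r_pointer == mid_point:
--             initial_arr[r_pointer] = val
--             r_pointer += 1
--             val += initial_diff
--             continue
--
--         initial_arr[r_pointer] = val
--         initial_arr[l_pointer] = -val
--         initial_diff += 1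
--         val += initial_diff
--         r_pointer += 1
--         l_pointer -= 1
--
--     return initial_arr
-- ===== SOURCE B (Python) =====
-- def gen_coords(initial_diff, limit):
--     def val(k):
--         return k * initial_diff + k * (k - 1) // 2
--     left = [-val(k) for k in range(limit - 2, 0, -1)]
--     right = [val(k) for k in range(0, limit - 1)]
--     return left + right
-- ===== Notes on version B (the rewrite author's own statement) =====
-- stated objective: simpler
-- what changed: Replaced the two-pointer in-place fill with running accumulators (val and a self-incrementing diff) by a direct closed form val(k) = k*initial_diff + k*(k-1)//2 used in two range comprehensions that are concatenated.
import Mathlib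
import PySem

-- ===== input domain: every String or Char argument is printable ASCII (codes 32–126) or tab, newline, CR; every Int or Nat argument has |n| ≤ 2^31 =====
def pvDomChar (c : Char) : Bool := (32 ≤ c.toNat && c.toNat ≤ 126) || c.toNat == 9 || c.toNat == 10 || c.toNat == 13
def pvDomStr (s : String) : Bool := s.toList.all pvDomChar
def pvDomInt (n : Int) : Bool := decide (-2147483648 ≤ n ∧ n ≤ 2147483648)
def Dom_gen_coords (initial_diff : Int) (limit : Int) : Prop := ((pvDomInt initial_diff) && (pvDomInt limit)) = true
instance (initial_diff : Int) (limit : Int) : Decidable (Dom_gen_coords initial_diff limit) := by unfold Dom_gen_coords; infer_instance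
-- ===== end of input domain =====

-- B replaces A's two-pointer in-place fill with running accumulators by a per-element
-- closed form val(k) = k*initial_diff + k*(k-1)//2 over two ranges (objective: simpler).

-- ===== PORT A =====
-- the while loop of A: state (arr, mid_point, l_pointer, r_pointer, initial_diff, val)
def genLoopA (arr : List Int) (mid l r diff val : Int) : List Int :=
  if _h : r < (arr.length : Int) then
    if r = mid then
      genLoopA (PySem.List.pySetD arr r val) mid l (r + 1) diff (val + diff)
    else
      genLoopA (PySem.List.pySetD (PySem.List.pySetD arr r val) l (-val)) mid (l - 1) (r + 1)
        (diff + 1) (val + (diff + 1))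
  else arr
termination_by ((arr.length : Int) - r).toNat
decreasing_by
  all_goals simp only [PySem.List.length_pySetD]; omega

def gen_coords (initial_diff : Int) (limit : Int) : List Int :=
  let initial_arr := (PySem.List.pyRange 0 ((limit - 1) + (limit - 2)) 1).map (fun _ => (0 : Int))
  let mid_point := limit - 2
  genLoopA initial_arr mid_point (mid_point - 1) mid_point initial_diff 0

-- ===== PORT B =====
def gen_coords_alt (initial_diff : Int) (limit : Int) : List Int :=
  let val := fun (k : Int) => k * initial_diff + PySem.Int.floordiv (k * (k - 1)) 2
  let left := (PySem.List.pyRange (limit - 2) 0 (-1)).map (fun k => -(val k))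
  let right := (PySem.List.pyRange 0 (limit - 1) 1).map (fun k => val k)
  left ++ right

-- ===== PRECONDITION & SPEC =====
-- A raises IndexError for limit <= 1 (it writes through an out-of-range pointer); excluded.
def Pre_gen_coords (initial_diff : Int) (limit : Int) : Prop := 2 ≤ limit
instance (initial_diff : Int) (limit : Int) : Decidable (Pre_gen_coords initial_diff limit) := by
  unfold Pre_gen_coords; infer_instance
def pvWitness_gen_coords : Int × Int := (1, 5)

def Spec_gen_coords (initial_diff : Int) (limit : Int) (out : List Int) : Prop :=
  out = gen_coords_alt initial_diff limit
instance (initial_diff : Int) (limit : Int) (out : List Int) : Decidable (Spec_gen_coords initial_diff limit out) := by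
  unfold Spec_gen_coords; infer_instance

-- ===== CLAIM (what is proved, stated in full; the proofs are below) =====
def Claim_equal_gen_coords : Prop := ∀ (initial_diff : Int) (limit : Int), Dom_gen_coords initial_diff limit → Pre_gen_coords initial_diff limit → Spec_gen_coords initial_diff limit (gen_coords initial_diff limit)
-- ===== LEMMAS AND PROOFS =====

-- B's closed form and the common target list
def valf (d k : Int) : Int := k * d + PySem.Int.floordiv (k * (k - 1)) 2

def targetF (d : Int) (n : Nat) (i : Nat) : Int :=
  if (i : Int) < n then -(valf d ((n : Int) - i)) else valf d ((i : Int) - n)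

lemma floordiv_two_mul (t : Int) : PySem.Int.floordiv (2 * t) 2 = t := by
  rw [PySem.Int.floordiv_eq_ediv_of_pos (by norm_num)]; omega

lemma mul_pred_even (k : Int) : ∃ t : Int, k * (k - 1) = 2 * t := by
  rcases Int.even_or_odd k with ⟨a, ha⟩ | ⟨a, ha⟩
  · exact ⟨a * (k - 1), by rw [ha]; ring⟩
  · exact ⟨k * a, by rw [ha]; ring⟩

lemma valf_succ (d k : Int) (hk : 0 ≤ k) : valf d (k + 1) = valf d k + d + k := by
  obtain ⟨t, ht⟩ := mul_pred_even k
  have h1 : (k + 1) * (k + 1 - 1) = 2 * (t + k) := by linear_combination ht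
  unfold valf
  rw [h1, ht, floordiv_two_mul, floordiv_two_mul]; ring

lemma valf_zero (d : Int) : valf d 0 = 0 := by
  unfold valf
  norm_num [show (0:Int) * (0 - 1) = 2 * 0 by ring, floordiv_two_mul]

lemma valf_one (d : Int) : valf d 1 = d := by
  have := valf_succ d 0 le_rfl
  simp [valf_zero] at this
  simpa using this

-- the main loop invariant: once the pair step is reached with l = n - j, r = n + j,
-- diff = d + j - 1, val = valf d j, and arr already agrees with the target strictly
-- between the pointers, the loop produces the whole target list.
theorem loopA_eq (d : Int) (n j : Nat) (hj : 1 ≤ j) (arr : List Int)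
    (hlen : arr.length = 2 * n + 1)
    (hagree : ∀ i : Nat, i < 2 * n + 1 → (n : Int) - j < i → (i : Int) < (n : Int) + j →
      arr.getD i 0 = targetF d n i) :
    genLoopA arr n ((n : Int) - j) ((n : Int) + j) (d + j - 1) (valf d j) =
      (List.range (2 * n + 1)).map (targetF d n) := by
  rcases (by omega : j ≤ n ∨ n < j) with hle | hgt
  · rw [genLoopA, dif_pos (by rw [hlen]; push_cast; omega), if_neg (by push_cast; omega)]
    have ha : (n : Int) + j = ((n + j : Nat) : Int) := by push_cast; ring
    have hb : (n : Int) - j = ((n - j : Nat) : Int) := by omega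
    rw [ha, hb, PySem.List.pySetD_natCast, PySem.List.pySetD_natCast]
    set v := valf d j with hv
    set arr2 := (arr.set (n + j) v).set (n - j) (-v) with harr2
    have hlen2 : arr2.length = 2 * n + 1 := by simp [harr2, hlen]
    have hagree2 : ∀ i : Nat, i < 2 * n + 1 → (n : Int) - (j + 1) < i →
        (i : Int) < (n : Int) + (j + 1) → arr2.getD i 0 = targetF d n i := by
      intro i hi h1 h2
      have hilt : i < arr2.length := by omega
      rw [List.getD_eq_getElem arr2 0 hilt]
      simp only [harr2, List.getElem_set]
      by_cases hi1 : n - j = i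
      · subst hi1
        rw [if_pos rfl]
        unfold targetF
        rw [if_pos (by omega)]
        have hji : (n : Int) - ((n - j : Nat) : Int) = (j : Int) := by omega
        rw [hji, hv]
      · rw [if_neg hi1]
        by_cases hi2 : n + j = i
        · subst hi2
          rw [if_pos rfl]
          unfold targetF
          rw [if_neg (by omega)]
          rw [hv]
          congr 1
          push_cast; ring
        · rw [if_neg hi2]
          have := hagree i hi (by omega) (by omega)
          rwa [List.getD_eq_getElem arr 0 (by omega)] at this
    have hrec := loopA_eq d n (j + 1) (by omega) arr2 hlen2 hagree2
    have e1 : (n : Int) - ((j : Nat) + 1 : Nat) = (n : Int) - j - 1 := by push_cast; ring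
    have e2 : (n : Int) + ((j : Nat) + 1 : Nat) = (n : Int) + j + 1 := by push_cast; ring
    have e3 : d + ((j : Nat) + 1 : Nat) - 1 = d + j - 1 + 1 := by push_cast; ring
    have e4 : valf d ((j : Nat) + 1 : Nat) = v + (d + j - 1 + 1) := by
      rw [hv]
      push_cast
      rw [valf_succ d j (by positivity)]
      ring
    rw [e1, e2, e3, e4] at hrec
    rw [hb] at hrec
    exact hrec
  · rw [genLoopA, dif_neg (by rw [hlen]; push_cast; omega)]
    apply List.ext_getElem (by simp [hlen])
    intro i h1 h2
    have hi : i < 2 * n + 1 := by omega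
    have := hagree i hi (by omega) (by omega)
    rw [List.getD_eq_getElem arr 0 h1] at this
    simpa using this
termination_by n + 1 - j
decreasing_by omega

lemma alt_eq (d : Int) (m : Nat) :
    gen_coords_alt d ((m : Int) + 2) = (List.range (2 * m + 1)).map (targetF d m) := by
  unfold gen_coords_alt
  dsimp only
  have h2m : 2 * m + 1 = m + (m + 1) := by omega
  rw [h2m, List.range_add, List.map_append, List.map_map]
  have harg1 : (m : Int) + 2 - 2 = (m : Int) := by ring
  have harg2 : (m : Int) + 2 - 1 = (m : Int) + 1 := by ring
  rw [harg1, harg2, PySem.List.pyRange_neg_one, PySem.List.pyRange_one, List.map_map, List.map_map]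
  have ht1 : ((m : Int) - 0).toNat = m := by omega
  have ht2 : ((m : Int) + 1 - 0).toNat = m + 1 := by omega
  rw [ht1, ht2]
  congr 1
  · apply List.map_congr_left
    intro k hk
    rw [List.mem_range] at hk
    simp only [Function.comp_apply]
    unfold targetF
    rw [if_pos (by omega)]
    simp [valf]
  · apply List.map_congr_left
    intro k hk
    rw [List.mem_range] at hk
    simp only [Function.comp_apply]
    unfold targetF
    rw [if_neg (by omega)]
    have : ((m + k : Nat) : Int) - m = (k : Int) := by push_cast; ring
    rw [this]
    simp [valf]

lemma replicate_zeros (m : Nat) :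
    (PySem.List.pyRange 0 (((m : Int) + 2 - 1) + ((m : Int) + 2 - 2)) 1).map (fun _ => (0 : Int)) =
      List.replicate (2 * m + 1) 0 := by
  rw [PySem.List.pyRange_one, List.map_map]
  have : (((m : Int) + 2 - 1) + ((m : Int) + 2 - 2) - 0).toNat = 2 * m + 1 := by omega
  rw [this]
  simp [List.eq_replicate_iff]

-- ===== VERDICT (by name: the statement is the Claim_ definition above) =====
theorem gen_coords_spec : Claim_equal_gen_coords := by
  unfold Claim_equal_gen_coords
  intro d limit _ hpre
  unfold Pre_gen_coords at hpre
  unfold Spec_gen_coords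
  obtain ⟨m, rfl⟩ : ∃ m : Nat, limit = (m : Int) + 2 := ⟨(limit - 2).toNat, by omega⟩
  rw [alt_eq]
  unfold gen_coords
  simp only
  rw [replicate_zeros]
  have hmid : (m : Int) + 2 - 2 = (m : Int) := by ring
  rw [hmid]
  rw [genLoopA, dif_pos (by simp; omega), if_pos rfl]
  have hset : PySem.List.pySetD (List.replicate (2 * m + 1) (0 : Int)) (m : Int) 0 =
      List.replicate (2 * m + 1) 0 := by
    rw [PySem.List.pySetD_natCast]
    apply List.ext_getElem (by simp)
    intro i h1 h2
    rw [List.getElem_set]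
    simp
  rw [hset]
  have h1 := loopA_eq d m 1 le_rfl (List.replicate (2 * m + 1) 0) (by simp)
    (by
      intro i hi hl hr
      have : i = m := by omega
      subst this
      rw [List.getD_eq_getElem _ 0 (by simp; omega)]
      unfold targetF
      rw [if_neg (by omega)]
      simp [valf_zero])
  have e1 : ((1 : Nat) : Int) = (1 : Int) := by norm_num
  rw [e1] at h1
  rw [valf_one] at h1
  have e3 : d + 1 - 1 = d := by ring
  rw [e3] at h1
  have e4 : (0 : Int) + d = d := by ring
  rw [e4]
  exact h1
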